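-- pv_equiv track=rewrite | github.com/marcosvsilva/pupilometer | pupilometer/ellipse.py | calculating_coordinates
-- ===== SOURCE A (Python) =====
-- def calculating_coordinates(coordinates, direction):
--     x, y = coordinates
--     for i in range(str(direction).count('north')):
--         y -= 1
--     for i in range(str(direction).count('south')):
--         y += 1
--     for i in range(str(direction).count('east')):
--         x += 1
--     for i in range(str(direction).count('west')):
--         x -= 1
--     return x, y
-- ===== SOURCE B (Python) =====
-- def calculating_coordinates(coordinates, direction):
--     # Single left-to-right scan: at each position of the string, look up which
--     # direction word (if any) starts there in a delta table and apply its offset.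
--     x, y = coordinates
--     s = str(direction)
--     deltas = {'north': (0, -1), 'south': (0, 1), 'east': (1, 0), 'west': (-1, 0)}
--     for i in range(len(s)):
--         for word, (dx, dy) in deltas.items():
--             if s.startswith(word, i):
--                 x += dx
--                 y += dy
--     return x, y
-- ===== Notes on version B (the rewrite author's own statement) =====
-- stated objective: alternative
-- what changed: Replaces four separate str.count passes driving unit-step loops by one single left-to-right scan of the string that matches the four direction words at each position via a delta table and accumulates the (x, y) offset in one pass; correct because none of the four words can start strictly inside an occurrence of itself (their first letter never recurs in them), so non-overlapping count() equals the number of matching start positions.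
import Mathlib
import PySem

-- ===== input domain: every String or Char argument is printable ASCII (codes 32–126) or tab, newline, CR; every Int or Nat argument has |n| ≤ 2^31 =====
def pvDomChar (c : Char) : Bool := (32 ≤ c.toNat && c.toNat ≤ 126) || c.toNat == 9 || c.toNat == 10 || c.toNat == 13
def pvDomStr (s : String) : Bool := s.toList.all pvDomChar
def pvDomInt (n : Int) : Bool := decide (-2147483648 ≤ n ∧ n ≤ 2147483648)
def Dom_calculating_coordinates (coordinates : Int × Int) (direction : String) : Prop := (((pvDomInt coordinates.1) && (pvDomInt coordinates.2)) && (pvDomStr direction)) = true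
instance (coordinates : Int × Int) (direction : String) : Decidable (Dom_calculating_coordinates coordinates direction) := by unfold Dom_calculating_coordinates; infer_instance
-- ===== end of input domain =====

-- B replaces A's four independent str.count passes (each driving a unit-step loop) by one
-- single left-to-right scan of the string with a delta table (objective: alternative).

-- ===== PORT A =====
def calculating_coordinates (coordinates : Int × Int) (direction : String) : Int × Int :=
  let x := coordinates.1
  let y := coordinates.2
  let y := (PySem.List.pyRange 0 (PySem.Str.count direction "north") 1).foldl (fun acc _ => acc - 1) y
  let y := (PySem.List.pyRange 0 (PySem.Str.count direction "south") 1).foldl (fun acc _ => acc + 1) y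
  let x := (PySem.List.pyRange 0 (PySem.Str.count direction "east") 1).foldl (fun acc _ => acc + 1) x
  let x := (PySem.List.pyRange 0 (PySem.Str.count direction "west") 1).foldl (fun acc _ => acc - 1) x
  (x, y)

-- ===== PORT B =====
-- the delta table of Source B (dict in insertion order)
def pvDeltas : List (String × (Int × Int)) :=
  [("north", (0, -1)), ("south", (0, 1)), ("east", (1, 0)), ("west", (-1, 0))]

-- the `for i in range(len(s))` loop of Source B, as recursion on the suffixes of the string;
-- `s.startswith(word, i)` with 0 ≤ i < len(s) is exactly `word` being a prefix of the i-th
-- suffix, ported as PySem.Chars.startswith on that suffix (exact on these inputs).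
def pvScanB : List Char → Int → Int → Int × Int
  | [], x, y => (x, y)
  | c :: t, x, y =>
    let p := pvDeltas.foldl
      (fun (p : Int × Int) wd =>
        if PySem.Chars.startswith (c :: t) wd.1.toList then (p.1 + wd.2.1, p.2 + wd.2.2) else p)
      (x, y)
    pvScanB t p.1 p.2

def calculating_coordinates_alt (coordinates : Int × Int) (direction : String) : Int × Int :=
  pvScanB direction.toList coordinates.1 coordinates.2

-- ===== PRECONDITION & SPEC =====
def Spec_calculating_coordinates (coordinates : Int × Int) (direction : String) (out : Int × Int) : Prop := out = calculating_coordinates_alt coordinates direction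
instance (coordinates : Int × Int) (direction : String) (out : Int × Int) : Decidable (Spec_calculating_coordinates coordinates direction out) := by unfold Spec_calculating_coordinates; infer_instance

-- ===== CLAIM (what is proved, stated in full; the proofs are below) =====
def Claim_equal_calculating_coordinates : Prop := ∀ (coordinates : Int × Int) (direction : String), Dom_calculating_coordinates coordinates direction → Spec_calculating_coordinates coordinates direction (calculating_coordinates coordinates direction)

-- ===== LEMMAS AND PROOFS =====

-- number of start positions (suffixes) of s at which w begins
def pvCnt (w : List Char) : List Char → Nat
  | [] => 0
  | c :: t => (if w.isPrefixOf (c :: t) then 1 else 0) + pvCnt w t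

theorem pvGo_succ_cons (w : List Char) (fuel : Nat) (c : Char) (t : List Char) (acc : Nat) :
    PySem.Chars.count.go w (fuel + 1) (c :: t) acc =
      if w.isPrefixOf (c :: t) then PySem.Chars.count.go w fuel ((c :: t).drop w.length) (acc + 1)
      else PySem.Chars.count.go w fuel t acc := rfl

theorem pvCnt_drop_of_no_match (w : List Char) (k : Nat) (hk : 1 ≤ k) (l : List Char)
    (h : ∀ j, 0 < j → j < k → w.isPrefixOf (l.drop j) = false) :
    pvCnt w (l.drop 1) = pvCnt w (l.drop k) := by
  induction k with
  | zero => omega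
  | succ k ih =>
    rcases Nat.lt_or_ge k 1 with hk1 | hk1
    · interval_cases k; rfl
    · have hdd : l.drop (k + 1) = (l.drop k).drop 1 := by rw [List.drop_drop]
      have hstep : pvCnt w (l.drop k) = pvCnt w (l.drop (k + 1)) := by
        rcases hd : l.drop k with _ | ⟨c, t⟩
        · rw [hdd, hd]; simp [pvCnt]
        · have hpre : w.isPrefixOf (l.drop k) = false := h k (by omega) (by omega)
          rw [hd] at hpre
          rw [hdd, hd]
          simp [pvCnt, hpre]
      calc pvCnt w (l.drop 1) = pvCnt w (l.drop k) :=
            ih hk1 (fun j h0 hj => h j h0 (by omega))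
        _ = pvCnt w (l.drop (k + 1)) := hstep

-- count.go (non-overlapping counting with skip) equals the start-position count, provided
-- no occurrence of w can start strictly inside an occurrence of w
theorem pvCountGo_eq (w : List Char) (hw : w ≠ [])
    (hno : ∀ l, w.isPrefixOf l = true → ∀ j, 0 < j → j < w.length → w.isPrefixOf (l.drop j) = false)
    (fuel : Nat) (l : List Char) (acc : Nat) (hf : l.length ≤ fuel) :
    PySem.Chars.count.go w fuel l acc = acc + pvCnt w l := by
  induction fuel generalizing l acc with
  | zero =>
    have hl : l = [] := by
      cases l with
      | nil => rfl
      | cons c t => simp at hf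
    subst hl
    simp [PySem.Chars.count.go, pvCnt]
  | succ fuel ih =>
    cases l with
    | nil => simp [PySem.Chars.count.go, pvCnt]
    | cons c t =>
      rw [pvGo_succ_cons]
      have hlen : 1 ≤ w.length := by
        cases w with
        | nil => exact absurd rfl hw
        | cons a b => simp
      cases hb : w.isPrefixOf (c :: t) with
      | true =>
        have hdlen : ((c :: t).drop w.length).length ≤ fuel := by
          rw [List.length_drop]
          simp at hf ⊢
          omega
        rw [if_pos rfl, ih ((c :: t).drop w.length) (acc + 1) hdlen]
        have h1 : pvCnt w ((c :: t).drop 1) = pvCnt w ((c :: t).drop w.length) :=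
          pvCnt_drop_of_no_match w w.length hlen (c :: t) (hno (c :: t) hb)
        have h2 : pvCnt w (c :: t) = 1 + pvCnt w ((c :: t).drop w.length) := by
          rw [← h1]
          simp [pvCnt, hb]
        omega
      | false =>
        rw [if_neg (by simp), ih t acc (by simpa using hf)]
        simp [pvCnt, hb]

theorem pvCount_eq (w : List Char) (hw : w ≠ [])
    (hno : ∀ l, w.isPrefixOf l = true → ∀ j, 0 < j → j < w.length → w.isPrefixOf (l.drop j) = false)
    (s : List Char) :
    PySem.Chars.count s w = pvCnt w s := by
  have hne : w.isEmpty = false := by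
    cases w with
    | nil => exact absurd rfl hw
    | cons a b => rfl
  simp only [PySem.Chars.count, hne, Bool.false_eq_true, if_false]
  simpa using pvCountGo_eq w hw hno s.length s 0 (le_refl _)

-- the non-self-overlap condition for each word: its first letter never recurs in it
theorem pvNo_north : ∀ l, ("north".toList).isPrefixOf l = true →
    ∀ j, 0 < j → j < ("north".toList).length → ("north".toList).isPrefixOf (l.drop j) = false := by
  have hw : ("north".toList) = ['n','o','r','t','h'] := rfl
  rw [hw]
  intro l hl j h0 hj
  obtain ⟨r, rfl⟩ := List.isPrefixOf_iff_prefix.mp hl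
  simp only [List.length_cons, List.length_nil] at hj
  interval_cases j <;> simp [List.isPrefixOf]

theorem pvNo_south : ∀ l, ("south".toList).isPrefixOf l = true →
    ∀ j, 0 < j → j < ("south".toList).length → ("south".toList).isPrefixOf (l.drop j) = false := by
  have hw : ("south".toList) = ['s','o','u','t','h'] := rfl
  rw [hw]
  intro l hl j h0 hj
  obtain ⟨r, rfl⟩ := List.isPrefixOf_iff_prefix.mp hl
  simp only [List.length_cons, List.length_nil] at hj
  interval_cases j <;> simp [List.isPrefixOf]

theorem pvNo_east : ∀ l, ("east".toList).isPrefixOf l = true →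
    ∀ j, 0 < j → j < ("east".toList).length → ("east".toList).isPrefixOf (l.drop j) = false := by
  have hw : ("east".toList) = ['e','a','s','t'] := rfl
  rw [hw]
  intro l hl j h0 hj
  obtain ⟨r, rfl⟩ := List.isPrefixOf_iff_prefix.mp hl
  simp only [List.length_cons, List.length_nil] at hj
  interval_cases j <;> simp [List.isPrefixOf]

theorem pvNo_west : ∀ l, ("west".toList).isPrefixOf l = true →
    ∀ j, 0 < j → j < ("west".toList).length → ("west".toList).isPrefixOf (l.drop j) = false := by
  have hw : ("west".toList) = ['w','e','s','t'] := rfl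
  rw [hw]
  intro l hl j h0 hj
  obtain ⟨r, rfl⟩ := List.isPrefixOf_iff_prefix.mp hl
  simp only [List.length_cons, List.length_nil] at hj
  interval_cases j <;> simp [List.isPrefixOf]

-- the single scan computes the closed-form combination of the four start-position counts
theorem pvScanB_eq (s : List Char) (x y : Int) :
    pvScanB s x y =
      (x + pvCnt "east".toList s - pvCnt "west".toList s,
       y - pvCnt "north".toList s + pvCnt "south".toList s) := by
  induction s generalizing x y with
  | nil => simp [pvScanB, pvCnt]
  | cons c t ih =>
    simp only [pvScanB, pvDeltas, List.foldl, PySem.Chars.startswith]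
    rw [ih]
    simp only [pvCnt]
    split_ifs <;> simp only [Prod.mk.injEq] <;>
      refine ⟨by push_cast; ring, by push_cast; ring⟩

theorem pv_foldl_sub_one (l : List Int) (a : Int) :
    l.foldl (fun acc _ => acc - 1) a = a - l.length := by
  induction l generalizing a with
  | nil => simp
  | cons h t ih => simp [List.foldl, ih]; ring

theorem pv_foldl_add_one (l : List Int) (a : Int) :
    l.foldl (fun acc _ => acc + 1) a = a + l.length := by
  induction l generalizing a with
  | nil => simp
  | cons h t ih => simp [List.foldl, ih]; ring

-- ===== VERDICT =====
theorem calculating_coordinates_spec : Claim_equal_calculating_coordinates := by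
  intro c d _
  unfold Spec_calculating_coordinates calculating_coordinates calculating_coordinates_alt
  rw [pvScanB_eq]
  simp only [pv_foldl_sub_one, pv_foldl_add_one, PySem.List.length_pyRange_one,
    PySem.Str.count_eq,
    pvCount_eq ("north".toList) (by decide) pvNo_north,
    pvCount_eq ("south".toList) (by decide) pvNo_south,
    pvCount_eq ("east".toList) (by decide) pvNo_east,
    pvCount_eq ("west".toList) (by decide) pvNo_west, Int.sub_zero, Int.toNat_natCast]
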